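-- pv_equiv track=rewrite | github.com/Ombhavsar218/redscan | rescanai/scan_controller.py | _get_header_analysis_messages
-- ===== SOURCE A (Python) =====
-- from typing import Dict, List, Any, Optional, Callable
--
-- def _get_header_analysis_messages(step_count: int) -> List[str]:
--     """Generate different header analysis messages"""
--     base_messages = [
--         "Connecting to web server...",
--         "Sending HTTP request...",
--         "Analyzing response headers...",
--         "Checking Content-Security-Policy...",
--         "Verifying X-Frame-Options...",
--         "Examining X-XSS-Protection...",
--         "Checking X-Content-Type-Options...",
--         "Analyzing Strict-Transport-Security...",
--         "Verifying Referrer-Policy...",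
--         "Checking server information...",
--         "Analyzing security configurations...",
--         "Detecting web server type...",
--         "Checking for information disclosure...",
--         "Verifying HTTPS enforcement...",
--         "Analyzing cookie security...",
--         "Checking for clickjacking protection...",
--         "Verifying XSS protection...",
--         "Analyzing content type handling...",
--         "Checking for HSTS implementation...",
--         "Verifying referrer policies...",
--         "Analyzing cache control headers...",
--         "Checking for security misconfigurations...",
--         "Verifying header completeness...",
--         "Analyzing header values...",
--         "Checking for weak configurations...",
--         "Finalizing header analysis..."
--     ]
--
--     messages = []
--     for i in range(step_count):
--         messages.append(base_messages[i % len(base_messages)])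
--     return messages
-- ===== SOURCE B (Python) =====
-- from typing import List
--
-- def _get_header_analysis_messages(step_count: int) -> List[str]:
--     """Generate different header analysis messages"""
--     base_messages = [
--         "Connecting to web server...",
--         "Sending HTTP request...",
--         "Analyzing response headers...",
--         "Checking Content-Security-Policy...",
--         "Verifying X-Frame-Options...",
--         "Examining X-XSS-Protection...",
--         "Checking X-Content-Type-Options...",
--         "Analyzing Strict-Transport-Security...",
--         "Verifying Referrer-Policy...",
--         "Checking server information...",
--         "Analyzing security configurations...",
--         "Detecting web server type...",
--         "Checking for information disclosure...",
--         "Verifying HTTPS enforcement...",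
--         "Analyzing cookie security...",
--         "Checking for clickjacking protection...",
--         "Verifying XSS protection...",
--         "Analyzing content type handling...",
--         "Checking for HSTS implementation...",
--         "Verifying referrer policies...",
--         "Analyzing cache control headers...",
--         "Checking for security misconfigurations...",
--         "Verifying header completeness...",
--         "Analyzing header values...",
--         "Checking for weak configurations...",
--         "Finalizing header analysis..."
--     ]
--     q = max(step_count // len(base_messages) + 1, 0)
--     return (base_messages * q)[:step_count]
-- ===== Notes on version B (the rewrite author's own statement) =====
-- stated objective: idiomatic
-- what changed: Replaces the per-index modulo loop with whole-list replication (base_messages * q) followed by a [:step_count] slice.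
import Mathlib
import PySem

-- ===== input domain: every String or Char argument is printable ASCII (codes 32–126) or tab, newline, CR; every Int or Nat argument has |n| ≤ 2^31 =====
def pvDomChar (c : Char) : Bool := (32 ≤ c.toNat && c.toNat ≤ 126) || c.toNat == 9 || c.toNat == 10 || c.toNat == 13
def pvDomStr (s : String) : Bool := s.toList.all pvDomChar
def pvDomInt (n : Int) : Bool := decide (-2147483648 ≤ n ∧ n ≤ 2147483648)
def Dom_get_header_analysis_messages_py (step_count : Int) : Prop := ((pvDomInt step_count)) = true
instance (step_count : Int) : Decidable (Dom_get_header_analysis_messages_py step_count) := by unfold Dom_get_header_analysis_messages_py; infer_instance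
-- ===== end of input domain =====

-- B replaces A's per-index modulo loop by whole-list replication followed by a [:step_count] slice (idiomatic); return value only.

-- the fixed message list both programs carry as the same literal
def pvBaseMessages : List String := [
  "Connecting to web server...",
  "Sending HTTP request...",
  "Analyzing response headers...",
  "Checking Content-Security-Policy...",
  "Verifying X-Frame-Options...",
  "Examining X-XSS-Protection...",
  "Checking X-Content-Type-Options...",
  "Analyzing Strict-Transport-Security...",
  "Verifying Referrer-Policy...",
  "Checking server information...",
  "Analyzing security configurations...",
  "Detecting web server type...",
  "Checking for information disclosure...",
  "Verifying HTTPS enforcement...",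
  "Analyzing cookie security...",
  "Checking for clickjacking protection...",
  "Verifying XSS protection...",
  "Analyzing content type handling...",
  "Checking for HSTS implementation...",
  "Verifying referrer policies...",
  "Analyzing cache control headers...",
  "Checking for security misconfigurations...",
  "Verifying header completeness...",
  "Analyzing header values...",
  "Checking for weak configurations...",
  "Finalizing header analysis..."]

-- ===== PORT A =====
-- for i in range(step_count): messages.append(base_messages[i % len(base_messages)])
def get_header_analysis_messages_py (step_count : Int) : List String :=
  (PySem.List.pyRange 0 step_count 1).foldl
    (fun messages i =>
      messages ++ [PySem.List.pyGetD pvBaseMessages (PySem.Int.mod i (pvBaseMessages.length : Int)) ""])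
    []

-- ===== PORT B =====
-- q = max(step_count // len(base_messages) + 1, 0); return (base_messages * q)[:step_count]
def get_header_analysis_messages_py_alt (step_count : Int) : List String :=
  PySem.List.slice
    ((List.replicate (max (PySem.Int.floordiv step_count (pvBaseMessages.length : Int) + 1) 0).toNat
        pvBaseMessages).flatten)
    none (some step_count)

-- ===== PRECONDITION & SPEC =====
def Spec_get_header_analysis_messages_py (step_count : Int) (out : List String) : Prop := out = get_header_analysis_messages_py_alt step_count
instance (step_count : Int) (out : List String) : Decidable (Spec_get_header_analysis_messages_py step_count out) := by unfold Spec_get_header_analysis_messages_py; infer_instance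

-- ===== CLAIM (what is proved, stated in full; the proofs are below) =====
def Claim_equal_get_header_analysis_messages_py : Prop := ∀ (step_count : Int), Dom_get_header_analysis_messages_py step_count → Spec_get_header_analysis_messages_py step_count (get_header_analysis_messages_py step_count)

-- ===== LEMMAS AND PROOFS =====

theorem pv_foldl_append (g : Int → String) :
    ∀ (l : List Int) (acc : List String),
      l.foldl (fun a i => a ++ [g i]) acc = acc ++ l.map g := by
  intro l
  induction l with
  | nil => simp
  | cons x xs ih => intro acc; simp [List.foldl, ih]

theorem pv_flatten_replicate_getElem? {α : Type} (xs : List α) :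
    ∀ (q k : Nat), k < q * xs.length →
      ((List.replicate q xs).flatten)[k]? = xs[k % xs.length]? := by
  intro q
  induction q with
  | zero => intro k hk; simp at hk
  | succ q ih =>
    intro k hk
    rw [Nat.succ_mul] at hk
    simp only [List.replicate_succ, List.flatten_cons]
    by_cases h : k < xs.length
    · rw [List.getElem?_append_left h, Nat.mod_eq_of_lt h]
    · push_neg at h
      rw [List.getElem?_append_right h, ih (k - xs.length) (by omega),
          Nat.mod_eq_sub_mod h]

theorem pv_main (n : Int) :
    get_header_analysis_messages_py n = get_header_analysis_messages_py_alt n := by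
  unfold get_header_analysis_messages_py get_header_analysis_messages_py_alt
  have hL26 : (pvBaseMessages.length : Int) = 26 := by decide
  rw [hL26, PySem.Int.floordiv_eq_ediv_of_pos (by norm_num)]
  by_cases hn : n ≤ 0
  · rw [show PySem.List.pyRange 0 n 1 = [] by simp [PySem.List.pyRange, hn]]
    rcases lt_or_eq_of_le hn with h | h
    · rw [show max (n / 26 + 1) 0 = 0 by omega]
      simp [PySem.List.slice]
    · subst h
      rw [PySem.List.slice_to _ le_rfl]
      simp
  · have hn' : 0 < n := by omega
    rw [show max (n / 26 + 1) 0 = n / 26 + 1 from max_eq_left (by omega)]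
    have hnle : n.toNat ≤ (n / 26 + 1).toNat * 26 := by omega
    rw [show n = ((n.toNat : Nat) : Int) from (by omega)] 
    rw [PySem.List.pyRange_zero_natCast, pv_foldl_append, PySem.List.slice_to _ (by omega)]
    simp only [List.nil_append, Int.toNat_natCast, List.map_map]
    apply List.ext_getElem?
    intro k
    by_cases hk : k < n.toNat
    · have hkm : k % 26 < pvBaseMessages.length := Nat.mod_lt _ (by norm_num)
      rw [List.getElem?_take_of_lt hk, List.getElem?_map, List.getElem?_range hk,
          pv_flatten_replicate_getElem? pvBaseMessages _ k (by simp only [show pvBaseMessages.length = 26 from rfl]; omega)]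
      simp only [show pvBaseMessages.length = 26 from rfl]
      have hmod : PySem.Int.mod ((k : Nat) : Int) (26 : Int) = (((k % 26 : Nat)) : Int) := by
        rw [PySem.Int.mod_eq_emod_of_pos (by norm_num)]; omega
      simp only [Function.comp, hmod, PySem.List.pyGetD_natCast, Option.map_some]
      rw [List.getElem?_eq_getElem hkm]
      simp [List.getD, List.getElem?_eq_getElem hkm]
    · rw [List.getElem?_eq_none (by simp only [List.length_map, List.length_range]; omega),
          List.getElem?_eq_none (by simp only [List.length_take]; omega)]

-- ===== VERDICT (by name: the statement is the Claim_ definition above) =====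
theorem get_header_analysis_messages_py_spec : Claim_equal_get_header_analysis_messages_py := by
  intro n _
  unfold Spec_get_header_analysis_messages_py
  exact pv_main n
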